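-- pv_equiv track=rewrite | github.com/thealper2/leetcode-solutions | 2500-2599/2553-Separate-the-Digits-in-an-Array.py | separateDigits
-- ===== SOURCE A (Python) =====
-- from typing import List
--
-- def separateDigits(nums: List[int]) -> List[int]:
--     result = []
--     for num in nums:
--         digits = []
--         if num == 0:
--             digits.append(0)
--         else:
--             while num > 0:
--                 digits.append(num % 10)
--                 num = num // 10
--             digits = digits[::-1]
--
--         result.extend(digits)
--     return result
-- ===== SOURCE B (Python) =====
-- def separateDigits(nums):
--     # String-based digit split: digits come out most-significant-first directly,
--     # so no modulo loop, no reversal, no zero special-case. Negative numbers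
--     # contribute no digits (matching A, which emits nothing for them).
--     result = []
--     for num in nums:
--         if num >= 0:
--             result.extend(ord(c) - 48 for c in str(num))
--     return result
-- ===== Notes on version B (the rewrite author's own statement) =====
-- stated objective: simpler
-- what changed: B replaces A's per-number modulo/divide loop plus list reversal plus zero special-case with a single pass that converts each nonnegative number to its decimal string and emits the digit value of each character in order.
import Mathlib
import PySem

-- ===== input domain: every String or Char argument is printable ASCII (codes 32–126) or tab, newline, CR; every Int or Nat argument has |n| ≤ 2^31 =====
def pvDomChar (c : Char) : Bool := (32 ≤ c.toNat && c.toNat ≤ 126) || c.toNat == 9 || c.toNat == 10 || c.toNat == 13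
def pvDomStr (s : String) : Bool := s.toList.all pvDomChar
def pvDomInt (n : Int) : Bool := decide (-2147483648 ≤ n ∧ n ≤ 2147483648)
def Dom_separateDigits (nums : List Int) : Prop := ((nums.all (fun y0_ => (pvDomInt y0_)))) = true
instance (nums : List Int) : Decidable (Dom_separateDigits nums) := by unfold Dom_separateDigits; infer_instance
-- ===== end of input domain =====

-- B splits each number via its decimal string representation instead of A's
-- modulo/divide loop with reversal; same return value (simpler decomposition, not faster).

-- ===== PORT A =====
-- the inner 'while num > 0: digits.append(num % 10); num = num // 10' loop of A
def whileDigitsA (num : Int) (digits : List Int) : List Int :=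
  if _h : 0 < num then
    whileDigitsA (PySem.Int.floordiv num 10) (digits ++ [PySem.Int.mod num 10])
  else digits
termination_by num.toNat
decreasing_by
  rw [PySem.Int.floordiv_eq_ediv_of_pos (by norm_num)]
  omega

def separateDigits (nums : List Int) : List Int :=
  nums.foldl (fun result num =>
    if num == 0 then result ++ [0]
    else result ++ (PySem.List.slice? (whileDigitsA num []) none none (-1)).getD []) []

-- ===== PORT B =====
def separateDigits_alt (nums : List Int) : List Int :=
  nums.foldl (fun result num =>
    if num ≥ 0 then
      result ++ (PySem.Int.toChars num).map (fun c => ((c.toNat : Int) - 48))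
    else result) []

-- ===== PRECONDITION & SPEC =====
def Spec_separateDigits (nums : List Int) (out : List Int) : Prop := out = separateDigits_alt nums
instance (nums : List Int) (out : List Int) : Decidable (Spec_separateDigits nums out) := by unfold Spec_separateDigits; infer_instance

-- ===== CLAIM (what is proved, stated in full; the proofs are below) =====
def Claim_equal_separateDigits : Prop := ∀ (nums : List Int), Dom_separateDigits nums → Spec_separateDigits nums (separateDigits nums)

-- ===== LEMMAS AND PROOFS =====

-- most-significant-first digit list of a natural number, as Ints
def refDigits (n : Nat) : List Int :=
  if n < 10 then [(n : Int)]
  else refDigits (n / 10) ++ [((n % 10 : Nat) : Int)]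
termination_by n
decreasing_by omega

theorem whileDigitsA_spec : ∀ (m : Nat) (acc : List Int), 0 < m →
    whileDigitsA (m : Int) acc = acc ++ (refDigits m).reverse := by
  intro m
  induction m using Nat.strong_induction_on with
  | _ m ih =>
    intro acc hm
    rw [whileDigitsA, dif_pos (by exact_mod_cast hm : (0 : Int) < (m : Int))]
    have e1 : PySem.Int.floordiv (m : Int) 10 = ((m / 10 : Nat) : Int) := by
      rw [PySem.Int.floordiv_eq_ediv_of_pos (by norm_num)]; omega
    have e2 : PySem.Int.mod (m : Int) 10 = ((m % 10 : Nat) : Int) := by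
      rw [PySem.Int.mod_eq_emod_of_pos (by norm_num)]; omega
    rw [e1, e2]
    by_cases h10 : m < 10
    · rw [Nat.div_eq_of_lt h10, whileDigitsA]
      simp [refDigits, h10, Nat.mod_eq_of_lt h10]
    · have hpos : 0 < m / 10 := Nat.div_pos (by omega) (by omega)
      rw [ih (m / 10) (by omega) _ hpos]
      conv_rhs => rw [refDigits]
      rw [if_neg h10]
      simp

theorem digitChar_val (d : Nat) (h : d < 10) :
    ((Nat.digitChar d).toNat : Int) - 48 = (d : Int) := by
  interval_cases d <;> decide

theorem toDigitsCore_eq : ∀ (fuel n : Nat) (acc : List Char), n < fuel →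
    Nat.toDigitsCore 10 fuel n acc
      = (refDigits n).map (fun d => Nat.digitChar d.toNat) ++ acc := by
  intro fuel
  induction fuel with
  | zero => intro n acc h; omega
  | succ fuel ih =>
    intro n acc h
    rw [Nat.toDigitsCore]
    by_cases h0 : n / 10 = 0
    · have h10 : n < 10 := by omega
      simp [h0, refDigits, h10, Nat.mod_eq_of_lt h10]
    · have h10 : ¬ n < 10 := by omega
      rw [if_neg h0, ih (n / 10) _ (by omega)]
      conv_rhs => rw [refDigits]
      rw [if_neg h10]
      simp only [List.map_append, List.map_cons, List.map_nil, Int.toNat_natCast,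
        List.append_assoc, List.cons_append, List.nil_append]

theorem refDigits_bounds : ∀ (m : Nat), ∀ d ∈ refDigits m, 0 ≤ d ∧ d < 10 := by
  intro m
  induction m using Nat.strong_induction_on with
  | _ m ih =>
    intro d hd
    rw [refDigits] at hd
    split_ifs at hd with h10
    · simp at hd; omega
    · rcases List.mem_append.mp hd with h | h
      · exact ih (m / 10) (by omega) d h
      · simp at h; omega

theorem map_digitChar_inv (ds : List Int) (h : ∀ d ∈ ds, 0 ≤ d ∧ d < 10) :
    ds.map (fun d => (((Nat.digitChar d.toNat).toNat : Int) - 48)) = ds := by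
  induction ds with
  | nil => rfl
  | cons d tl ihl =>
    have hd := h d List.mem_cons_self
    simp only [List.map_cons]
    rw [ihl fun x hx => h x (List.mem_cons_of_mem d hx)]
    have := digitChar_val d.toNat (by omega)
    congr 1
    omega

theorem toChars_map_eq (m : Nat) :
    (PySem.Int.toChars (m : Int)).map (fun c => ((c.toNat : Int) - 48)) = refDigits m := by
  rw [PySem.Int.toChars,
    if_neg (by exact_mod_cast Nat.not_lt.mpr (Nat.zero_le m) : ¬ ((m : Int) < 0)),
    Int.toNat_natCast, Nat.toDigits, toDigitsCore_eq (m + 1) m [] (by omega),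
    List.append_nil, List.map_map]
  exact map_digitChar_inv (refDigits m) (refDigits_bounds m)

theorem step_eq (result : List Int) (num : Int) :
    (if num == 0 then result ++ [0]
     else result ++ (PySem.List.slice? (whileDigitsA num []) none none (-1)).getD [])
    = (if num ≥ 0 then
        result ++ (PySem.Int.toChars num).map (fun c => ((c.toNat : Int) - 48))
       else result) := by
  rcases lt_trichotomy num 0 with hlt | heq | hgt
  · rw [if_neg (by simpa using (by omega : num ≠ 0)), if_neg (by omega)]
    rw [whileDigitsA, dif_neg (by omega), PySem.List.slice?_none_none_neg_one]
    simp
  · subst heq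
    rw [if_pos (by decide), if_pos (by decide)]
    congr 1
  · rw [if_neg (by simpa using (by omega : num ≠ 0)), if_pos (by omega)]
    have hm : num = ((num.toNat : Nat) : Int) := by omega
    rw [hm, whileDigitsA_spec num.toNat [] (by omega), toChars_map_eq,
      PySem.List.slice?_none_none_neg_one]
    simp

-- ===== VERDICT (by name: the statement is the Claim_ definition above) =====
theorem separateDigits_spec : Claim_equal_separateDigits := by
  intro nums _
  unfold Spec_separateDigits separateDigits separateDigits_alt
  rw [funext fun result => funext fun num => step_eq result num]
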